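-- pv_equiv track=rewrite | github.com/pypi-data/pypi-mirror-201 | packages/truera/truera-11.3.4-py3-none-any.whl/truera/nlp/fairness/utils.py | get_segment_per_text
-- ===== SOURCE A (Python) =====
-- from collections import defaultdict
-- from typing import Any, Callable, Dict, Optional, Sequence, Tuple, Union
--
-- def get_segment_per_text(
--     text_list: Sequence[str], segments_dict: Dict[str, Any]
-- ) -> Sequence[str]:
--     '''
--         Return list of segment names for a given list of text samples
--         Args:
--             text_list: (Sequence[str]) list of text samples, shape = [N]
--         Return:
--             segments: (Sequence[str]) corresponding segments for each text sample, shape = [N]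
--         '''
--     segments = []
--
--     for text in text_list:
--         words = text.split()
--         metadata = defaultdict(int)
--         metadata_found = False
--         for word in words:
--             for segment in segments_dict:
--                 if word.lower() in segments_dict[segment]:
--                     metadata[segment] += 1
--                     metadata_found = True
--         if metadata_found:
--             segment = sorted(
--                 [(key, value) for key, value in metadata.items()],
--                 key=lambda x: (x[1], x[0])
--             )[-1][0]
--             segments.append(segment)
--         else:
--             segments.append('unclassified')
--     return segments
-- ===== SOURCE B (Python) =====
-- def get_segment_per_text(text_list, segments_dict):
--     # Inverted index: word -> list of segment names whose word list contains it
--     index = {}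
--     for seg_name, seg_words in segments_dict.items():
--         for w in set(seg_words):
--             index.setdefault(w, []).append(seg_name)
--     result = []
--     for text in text_list:
--         counts = {}
--         for word in text.split():
--             for seg_name in index.get(word.lower(), []):
--                 counts[seg_name] = counts.get(seg_name, 0) + 1
--         if counts:
--             result.append(max(counts.items(), key=lambda kv: (kv[1], kv[0]))[0])
--         else:
--             result.append('unclassified')
--     return result
-- ===== Notes on version B (the rewrite author's own statement) =====
-- stated objective: faster
-- what changed: B precomputes an inverted index word->segments once and looks each text word up in it instead of scanning every segment's word list per word, and picks the winner with a single max over (count, name) instead of sorting the counts and taking the last element.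
import Mathlib
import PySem

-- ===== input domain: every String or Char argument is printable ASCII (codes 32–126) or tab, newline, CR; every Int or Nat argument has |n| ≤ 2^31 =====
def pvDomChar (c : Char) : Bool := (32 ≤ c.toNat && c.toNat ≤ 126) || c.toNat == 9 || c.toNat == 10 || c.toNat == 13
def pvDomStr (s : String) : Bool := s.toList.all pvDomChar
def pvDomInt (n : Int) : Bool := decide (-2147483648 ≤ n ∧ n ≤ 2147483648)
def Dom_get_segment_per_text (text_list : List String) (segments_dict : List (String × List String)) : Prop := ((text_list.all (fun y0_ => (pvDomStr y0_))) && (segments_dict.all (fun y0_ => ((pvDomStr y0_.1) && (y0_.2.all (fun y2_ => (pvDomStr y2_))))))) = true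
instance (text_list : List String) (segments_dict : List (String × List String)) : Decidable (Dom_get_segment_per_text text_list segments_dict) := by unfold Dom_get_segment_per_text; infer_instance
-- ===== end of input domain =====

-- B replaces A's per-word scan over all segments by an inverted index word → segments built once,
-- and replaces sort-then-take-last by a single max with the same (count, name) key (objective: faster).

-- ===== PORT A =====
-- A-side helper: one word's pass over all segments (the inner 'for segment in segments_dict' loop)
def pvPairStep (segments_dict : List (String × List String)) (st : PySem.Dict String Int × Bool) (word : String) : PySem.Dict String Int × Bool :=
  segments_dict.foldl
    (fun st seg =>
      if PySem.Str.lower word ∈ seg.2 then (st.1.modify seg.1 0 (· + 1), true) else st)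
    st

def get_segment_per_text (text_list : List String) (segments_dict : List (String × List String)) : List String :=
  text_list.foldl (fun segments text =>
    let st := (PySem.Str.split₀ text).foldl (pvPairStep segments_dict) (PySem.Dict.empty, false)
    if st.2 then
      segments ++
        [match PySem.List.pyGet?
            (PySem.List.sorted2 st.1.items (fun p => p.2) (fun p => p.1)) (-1) with
          | some p => p.1
          | none => "unclassified"]   -- unreachable: metadata_found = true forces a nonempty dict, so [-1] cannot raise
    else segments ++ ["unclassified"])
    []

-- ===== PORT B =====
-- B-side helper: inverted index word → list of segment names whose word list contains it
def pvBuildIndex (segments_dict : List (String × List String)) : PySem.Dict String (List String) :=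
  segments_dict.foldl (fun idx seg =>
    (PySem.Set.ofList seg.2).foldl (fun idx w => idx.modify w [] (fun l => l ++ [seg.1])) idx)
    PySem.Dict.empty

-- B-side helper: per-text counts via the index
def pvCounts (index : PySem.Dict String (List String)) (text : String) : PySem.Dict String Int :=
  (PySem.Str.split₀ text).foldl (fun counts word =>
    (index.getD (PySem.Str.lower word) []).foldl
      (fun counts seg => counts.insert seg (counts.getD seg 0 + 1)) counts)
    PySem.Dict.empty

def get_segment_per_text_alt (text_list : List String) (segments_dict : List (String × List String)) : List String :=
  let index := pvBuildIndex segments_dict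
  text_list.foldl (fun result text =>
    let counts := pvCounts index text
    if counts.items.isEmpty then result ++ ["unclassified"]
    else
      result ++
        [match PySem.List.max2? counts.items (fun p => p.2) (fun p => p.1) with
          | some p => p.1
          | none => "unclassified"])   -- unreachable: counts is nonempty in this branch, so max cannot raise
    []

-- ===== PRECONDITION & SPEC =====
def Spec_get_segment_per_text (text_list : List String) (segments_dict : List (String × List String)) (out : List String) : Prop := out = get_segment_per_text_alt text_list segments_dict
instance (text_list : List String) (segments_dict : List (String × List String)) (out : List String) : Decidable (Spec_get_segment_per_text text_list segments_dict out) := by unfold Spec_get_segment_per_text; infer_instance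

-- ===== CLAIM (what is proved, stated in full; the proofs are below) =====
def Claim_equal_get_segment_per_text : Prop := ∀ (text_list : List String) (segments_dict : List (String × List String)), Dom_get_segment_per_text text_list segments_dict → Spec_get_segment_per_text text_list segments_dict (get_segment_per_text text_list segments_dict)

-- ===== LEMMAS AND PROOFS =====

-- proof-only helper: the canonical per-word update of the counting dict
def pvStepMd (sd : List (String × List String)) (md : PySem.Dict String Int) (word : String) : PySem.Dict String Int :=
  ((sd.filter (fun p => decide (PySem.Str.lower word ∈ p.2))).map (fun p => p.1)).foldl
    (fun md s => md.insert s (md.getD s 0 + 1)) md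

theorem pv_lt_lex (a b : String × Int) :
    (decide (a.2 < b.2) || (!decide (b.2 < a.2) && decide (a.1 < b.1)))
      = decide (toLex (a.2, a.1) < toLex (b.2, b.1)) := by
  rcases lt_trichotomy a.2 b.2 with h|h|h <;>
    by_cases h3 : a.1 < b.1 <;>
    simp [Prod.Lex.lt_iff, h, h3, lt_asymm]

theorem pv_sorted2_eq (xs : List (String × Int)) :
    PySem.List.sorted2 xs (fun p => p.2) (fun p => p.1)
      = PySem.List.sorted xs (fun p => toLex (p.2, p.1)) := by
  unfold PySem.List.sorted2 PySem.List.sorted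
  simp only
  congr 1
  funext acc x
  congr 1
  funext a b
  exact pv_lt_lex a b

theorem pv_max2_eq (xs : List (String × Int)) :
    PySem.List.max2? xs (fun p => p.2) (fun p => p.1)
      = PySem.List.max? xs (fun p => toLex (p.2, p.1)) := by
  unfold PySem.List.max2? PySem.List.max?
  congr 1
  funext acc x
  cases acc with
  | none => rfl
  | some m =>
    show (if (decide (m.2 < x.2) || (!decide (x.2 < m.2) && decide (m.1 < x.1))) = true then some x else some m)
       = (if toLex (m.2, m.1) < toLex (x.2, x.1) then some x else some m)
    rw [pv_lt_lex m x]
    by_cases h : toLex (m.2, m.1) < toLex (x.2, x.1) <;> simp [h]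

-- last of a stable sort = first maximum, for an injective key
theorem pv_last_max {α κ : Type} [LinearOrder κ] (xs : List α) (key : α → κ)
    (hinj : Function.Injective key) :
    (PySem.List.sorted xs key).getLast? = PySem.List.max? xs key := by
  rcases eq_or_ne xs [] with rfl | hne
  · have h1 : PySem.List.sorted ([] : List α) key = [] := by
      rw [PySem.List.sorted_eq_nil_iff]
    have h2 : PySem.List.max? ([] : List α) key = none := by
      rw [PySem.List.max?_eq_none_iff]
    rw [h1, h2]; rfl
  · have hs : PySem.List.sorted xs key ≠ [] := by
      rw [Ne, PySem.List.sorted_eq_nil_iff]; exact hne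
    set s := PySem.List.sorted xs key with hsdef
    have h0 : 0 < s.length := List.length_pos_iff.mpr hs
    have hm : s.getLast? = some (s.getLast hs) := List.getLast?_eq_some_getLast hs
    set m := s.getLast hs with hmdef
    have hmem : m ∈ xs := by
      rw [← PySem.List.mem_sorted xs key false]
      exact List.getLast_mem hs
    have hmax : ∀ y ∈ xs, key y ≤ key m := by
      intro y hy
      rw [← PySem.List.mem_sorted xs key false] at hy
      rw [← hsdef] at hy
      obtain ⟨p, hp, hyp⟩ := List.mem_iff_getElem.mp hy
      have := PySem.List.key_sorted_getElem_mono xs key (p := p) (q := s.length - 1)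
        (by omega) (by rw [← hsdef]; omega)
      have hlast : m = s[s.length - 1] := List.getLast_eq_getElem hs
      rw [hlast, ← hyp]
      exact this
    cases hm2 : PySem.List.max? xs key with
    | none => exact absurd (PySem.List.max?_eq_none_iff xs key |>.mp hm2) hne
    | some m2 =>
      have h1 : key m ≤ key m2 := PySem.List.max?_isMax hm2 m hmem
      have h2 : key m2 ≤ key m := hmax m2 (PySem.List.max?_mem hm2)
      have : m = m2 := hinj (le_antisymm h1 h2)
      rw [hm, this]

theorem pv_filter_map (s : List String) (seg c : String) (h : s.Nodup) :
    ((s.map (fun w => (w, seg))).filter (fun p => p.1 == c)).map (fun p => p.2)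
      = if c ∈ s then [seg] else [] := by
  induction s with
  | nil => simp
  | cons a t ih =>
    have hat : a ∉ t := (List.nodup_cons.mp h).1
    have ht := (List.nodup_cons.mp h).2
    by_cases hac : a = c
    · subst hac
      simp [ih ht, hat]
    · simp [hac, ih ht, List.mem_cons, Ne.symm hac]

theorem pv_index_getD (sd : List (String × List String)) (d : PySem.Dict String (List String)) (c : String) :
    (sd.foldl (fun idx seg =>
        (PySem.Set.ofList seg.2).foldl (fun idx w => idx.modify w [] (fun l => l ++ [seg.1])) idx) d).getD c []
      = d.getD c [] ++ (sd.filter (fun p => decide (c ∈ p.2))).map (fun p => p.1) := by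
  induction sd generalizing d with
  | nil => simp
  | cons seg rest ih =>
    rw [List.foldl_cons, ih]
    have hinner : (PySem.Set.ofList seg.2).foldl (fun idx w => idx.modify w [] (fun l => l ++ [seg.1])) d
        = ((PySem.Set.ofList seg.2).map (fun w => (w, seg.1))).foldl
            (fun idx p => idx.modify p.1 [] (fun l => l ++ [p.2])) d := by
      rw [List.foldl_map]
    rw [hinner, PySem.Dict.getD_foldl_modify_append,
        pv_filter_map _ _ _ (PySem.Set.nodup_ofList _), List.filter_cons]
    simp only [PySem.Set.mem_ofList]
    by_cases hc : c ∈ seg.2 <;> simp [hc, List.append_assoc]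

theorem pv_counts_eq (sd : List (String × List String)) (text : String) :
    pvCounts (pvBuildIndex sd) text = (PySem.Str.split₀ text).foldl (pvStepMd sd) PySem.Dict.empty := by
  unfold pvCounts pvBuildIndex pvStepMd
  congr 1
  funext counts word
  rw [pv_index_getD]
  simp [PySem.Dict.getD_empty]

theorem pv_word_fold (sd : List (String × List String)) (word : String) (md : PySem.Dict String Int) :
    sd.foldl (fun md seg => if PySem.Str.lower word ∈ seg.2 then md.modify seg.1 0 (· + 1) else md) md
      = pvStepMd sd md word := by
  unfold pvStepMd
  rw [List.foldl_map, List.foldl_filter]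
  simp [PySem.Dict.modify]

theorem pv_insert_ne (d : PySem.Dict String Int) (k : String) (v : Int) : (d.insert k v).items ≠ [] :=
  List.ne_nil_of_mem (PySem.Dict.mem_items_insert_self d k v)

theorem pv_fold_ins_ne (l : List String) (md : PySem.Dict String Int) (h : md.items ≠ []) :
    (l.foldl (fun md s => md.insert s (md.getD s 0 + 1)) md).items ≠ [] := by
  induction l generalizing md with
  | nil => exact h
  | cons a t ih => exact ih _ (pv_insert_ne _ _ _)

theorem pv_fold_ins_ne' (l : List String) (md : PySem.Dict String Int) (h : l ≠ []) :
    (l.foldl (fun md s => md.insert s (md.getD s 0 + 1)) md).items ≠ [] := by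
  cases l with
  | nil => exact absurd rfl h
  | cons a t => exact pv_fold_ins_ne t _ (pv_insert_ne _ _ _)

theorem pv_pair_fold (sd : List (String × List String)) (lw : String) (st : PySem.Dict String Int × Bool) :
    sd.foldl (fun st seg => if lw ∈ seg.2 then (st.1.modify seg.1 0 (· + 1), true) else st) st
      = (sd.foldl (fun md seg => if lw ∈ seg.2 then md.modify seg.1 0 (· + 1) else md) st.1,
         st.2 || sd.any (fun p => decide (lw ∈ p.2))) := by
  induction sd generalizing st with
  | nil => simp
  | cons seg rest ih =>
    by_cases h : lw ∈ seg.2 <;> simp [List.foldl_cons, ih, h]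

theorem pv_flag_step (sd : List (String × List String)) (word : String) (md : PySem.Dict String Int) (f : Bool)
    (h : f = !md.items.isEmpty) :
    (f || sd.any (fun p => decide (PySem.Str.lower word ∈ p.2)))
      = !(pvStepMd sd md word).items.isEmpty := by
  unfold pvStepMd
  cases hany : sd.any (fun p => decide (PySem.Str.lower word ∈ p.2)) with
  | false =>
    have hfil : sd.filter (fun p => decide (PySem.Str.lower word ∈ p.2)) = [] := by
      rw [List.filter_eq_nil_iff]
      intro a ha
      exact (List.any_eq_false.mp hany) a ha
    rw [hfil]
    simp [h]
  | true =>
    obtain ⟨x, hx, hpx⟩ := List.any_eq_true.mp hany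
    have hfil : (sd.filter (fun p => decide (PySem.Str.lower word ∈ p.2))).map (fun p => p.1) ≠ [] := by
      have : x ∈ sd.filter (fun p => decide (PySem.Str.lower word ∈ p.2)) := List.mem_filter.mpr ⟨hx, hpx⟩
      exact List.ne_nil_of_mem (List.mem_map_of_mem this)
    have hne := pv_fold_ins_ne' _ md hfil
    have hE : (((sd.filter (fun p => decide (PySem.Str.lower word ∈ p.2))).map (fun p => p.1)).foldl
        (fun md s => md.insert s (md.getD s 0 + 1)) md).items.isEmpty = false := by
      rw [List.isEmpty_eq_false_iff]; exact hne
    simp [hE]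

theorem pv_pairstep_eq (sd : List (String × List String)) (word : String) (st : PySem.Dict String Int × Bool) :
    pvPairStep sd st word
      = (pvStepMd sd st.1 word, st.2 || sd.any (fun p => decide (PySem.Str.lower word ∈ p.2))) := by
  unfold pvPairStep
  rw [pv_pair_fold, pv_word_fold]

theorem pv_words_fold (sd : List (String × List String)) (words : List String)
    (st : PySem.Dict String Int × Bool) (h : st.2 = !st.1.items.isEmpty) :
    words.foldl (pvPairStep sd) st
      = (words.foldl (pvStepMd sd) st.1, !(words.foldl (pvStepMd sd) st.1).items.isEmpty) := by
  induction words generalizing st with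
  | nil =>
    rw [List.foldl_nil, List.foldl_nil]
    cases st with
    | mk a b => simp at h ⊢; exact h
  | cons w ws ih =>
    rw [List.foldl_cons, List.foldl_cons, pv_pairstep_eq]
    exact ih _ (pv_flag_step sd w st.1 st.2 h)

theorem pv_key_inj : Function.Injective (fun p : String × Int => toLex (p.2, p.1)) := by
  intro p q h
  have h2 := congrArg ofLex h
  simp only [ofLex_toLex, Prod.mk.injEq] at h2
  exact Prod.ext h2.2 h2.1

-- ===== VERDICT (by name: the statement is the Claim_ definition above) =====
theorem get_segment_per_text_spec : Claim_equal_get_segment_per_text := by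
  unfold Claim_equal_get_segment_per_text
  intro tl sd _
  unfold Spec_get_segment_per_text
  simp only [get_segment_per_text, get_segment_per_text_alt]
  congr 1
  funext acc text
  rw [pv_counts_eq, pv_words_fold sd _ (PySem.Dict.empty, false) rfl]
  have hsel : (match PySem.List.pyGet?
        (PySem.List.sorted2 ((PySem.Str.split₀ text).foldl (pvStepMd sd) PySem.Dict.empty).items
          (fun p => p.2) (fun p => p.1)) (-1) with
      | some p => p.1
      | none => "unclassified")
    = (match PySem.List.max2? ((PySem.Str.split₀ text).foldl (pvStepMd sd) PySem.Dict.empty).items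
          (fun p => p.2) (fun p => p.1) with
      | some p => p.1
      | none => "unclassified") := by
    rw [PySem.List.pyGet?_neg_one, pv_sorted2_eq, pv_max2_eq, pv_last_max _ _ pv_key_inj]
  cases hE : ((PySem.Str.split₀ text).foldl (pvStepMd sd) PySem.Dict.empty).items.isEmpty with
  | true => simp
  | false => simp [hsel]
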